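-- pv_equiv track=rewrite | github.com/trongtqFX21166/activity-report | UpdateProfileLevelInDurationTime.py | calculate_level_thresholds
-- ===== SOURCE A (Python) =====
-- def calculate_level_thresholds(max_level=100):
--     """Calculate thresholds for all levels using the formula:
--     Level N threshold = Level (N-1) threshold + 150*(N-2)
--     """
--     thresholds = {
--         1: 0,  # Level 1: >= 0 points
--         2: 50,  # Level 2: >= 50 points
--     }
--
--     # Calculate Level 3 and beyond
--     for level in range(3, max_level + 1):
--         thresholds[level] = thresholds[level - 1] + 150 * (level - 2)
--
--     return thresholds
-- ===== SOURCE B (Python) =====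
-- def calculate_level_thresholds(max_level=100):
--     """Closed form: level N (N >= 2) threshold = 50 + 150*(N-2)*(N-1)//2."""
--     return {1: 0, 2: 50} | {n: 50 + 150 * (n - 2) * (n - 1) // 2
--                             for n in range(3, max_level + 1)}
-- ===== Notes on version B (the rewrite author's own statement) =====
-- stated objective: alternative
-- what changed: Replaces the sequential accumulation (each threshold built from the previous one) with a direct per-level closed form 50 + 150*(n-2)*(n-1)//2 evaluated independently in a dict comprehension merged onto the literal base {1:0, 2:50}.
import Mathlib
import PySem

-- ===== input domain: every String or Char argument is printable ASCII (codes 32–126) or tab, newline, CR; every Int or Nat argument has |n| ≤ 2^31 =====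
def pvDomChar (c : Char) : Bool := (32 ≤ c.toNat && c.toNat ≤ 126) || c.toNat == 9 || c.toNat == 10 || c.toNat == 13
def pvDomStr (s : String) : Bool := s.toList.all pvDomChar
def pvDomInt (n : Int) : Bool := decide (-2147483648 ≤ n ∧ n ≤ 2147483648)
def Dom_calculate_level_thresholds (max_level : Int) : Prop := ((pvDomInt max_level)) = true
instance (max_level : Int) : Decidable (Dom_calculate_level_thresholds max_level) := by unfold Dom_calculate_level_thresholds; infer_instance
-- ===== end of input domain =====

-- B replaces A's sequential accumulation with an independent closed-form formula per level (alternative decomposition, same cost).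


-- ===== PORT A =====
-- thresholds[level-1] is always present in the dict (level-1 ≥ 2), so Python's
-- thresholds[level - 1] never raises; getD … 0 is exact on this loop.
def calculate_level_thresholds (max_level : Int) : List (Int × Int) :=
  let thresholds : PySem.Dict Int Int := PySem.Dict.mk [(1, 0), (2, 50)]
  let thresholds :=
    (PySem.List.pyRange 3 (max_level + 1) 1).foldl
      (fun d level => d.insert level (d.getD (level - 1) 0 + 150 * (level - 2)))
      thresholds
  thresholds.items

-- ===== PORT B =====
-- the comprehension's value expression 50 + 150*(n-2)*(n-1)//2
def pvClosed (n : Int) : Int := 50 + PySem.Int.floordiv (150 * (n - 2) * (n - 1)) 2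

-- {1:0, 2:50} | {comprehension}: the comprehension's keys (≥ 3, strictly increasing) are
-- fresh and distinct, so the merged dict's items are the base pairs followed by the mapped range.
def calculate_level_thresholds_alt (max_level : Int) : List (Int × Int) :=
  [(1, 0), (2, 50)] ++ (PySem.List.pyRange 3 (max_level + 1) 1).map (fun n => (n, pvClosed n))

-- ===== PRECONDITION & SPEC =====
def Spec_calculate_level_thresholds (max_level : Int) (out : List (Int × Int)) : Prop := out = calculate_level_thresholds_alt max_level
instance (max_level : Int) (out : List (Int × Int)) : Decidable (Spec_calculate_level_thresholds max_level out) := by unfold Spec_calculate_level_thresholds; infer_instance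

-- ===== CLAIM (what is proved, stated in full; the proofs are below) =====
def Claim_equal_calculate_level_thresholds : Prop := ∀ (max_level : Int), Dom_calculate_level_thresholds max_level → Spec_calculate_level_thresholds max_level (calculate_level_thresholds max_level)

-- ===== LEMMAS AND PROOFS =====

-- the closed form satisfies A's recurrence
lemma pvClosed_step (c : Int) : pvClosed (c - 1) + 150 * (c - 2) = pvClosed c := by
  unfold pvClosed
  have h1 : PySem.Int.floordiv (150 * (c - 1 - 2) * (c - 1 - 1)) 2 = 75 * (c - 3) * (c - 2) := by
    rw [PySem.Int.floordiv_eq_ediv_of_pos (by omega)]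
    have : 150 * (c - 1 - 2) * (c - 1 - 1) = 75 * (c - 3) * (c - 2) * 2 := by ring
    rw [this, Int.mul_ediv_cancel _ (by omega)]
  have h2 : PySem.Int.floordiv (150 * (c - 2) * (c - 1)) 2 = 75 * (c - 2) * (c - 1) := by
    rw [PySem.Int.floordiv_eq_ediv_of_pos (by omega)]
    have : 150 * (c - 2) * (c - 1) = 75 * (c - 2) * (c - 1) * 2 := by ring
    rw [this, Int.mul_ediv_cancel _ (by omega)]
  rw [h1, h2]; ring

lemma pvKeys_nodup (c : Int) :
    (([(1, 0), (2, 50)] ++ (PySem.List.pyRange 3 c 1).map (fun n => ((n : Int), pvClosed n))).map Prod.fst).Nodup := by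
  have hr : (([(1, 0), (2, 50)] ++ (PySem.List.pyRange 3 c 1).map (fun n => ((n : Int), pvClosed n))).map Prod.fst)
      = [1, 2] ++ PySem.List.pyRange 3 c 1 := by
    simp [Function.comp_def]
  rw [hr]
  refine List.Nodup.append ?_ (PySem.List.nodup_pyRange_one 3 c) ?_
  · simp
  · intro x hx hx'
    rw [PySem.List.mem_pyRange_one] at hx'
    simp at hx
    omega

lemma pv_loop (k : Nat) :
    (PySem.List.pyRange 3 (3 + (k : Int)) 1).foldl
      (fun d level => d.insert level (d.getD (level - 1) 0 + 150 * (level - 2)))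
      (PySem.Dict.mk [(1, 0), (2, 50)])
    = PySem.Dict.mk ([(1, 0), (2, 50)] ++ (PySem.List.pyRange 3 (3 + (k : Int)) 1).map (fun n => (n, pvClosed n))) := by
  induction k with
  | zero =>
    rw [show (3 : Int) + ((0 : Nat) : Int) = 3 by norm_num,
      PySem.List.pyRange_one_eq_nil (le_refl (3 : Int))]
    rfl
  | succ k ih =>
    set c : Int := 3 + (k : Int) with hc
    have hstep : (3 : Int) + ((k + 1 : Nat) : Int) = c + 1 := by push_cast; omega
    rw [hstep, PySem.List.pyRange_one_succ_right (by omega), List.foldl_append, ih]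
    simp only [List.foldl_cons, List.foldl_nil]
    have hnd := pvKeys_nodup c
    -- the dict built so far
    set D : PySem.Dict Int Int :=
      PySem.Dict.mk ([(1, 0), (2, 50)] ++ (PySem.List.pyRange 3 c 1).map (fun n => (n, pvClosed n))) with hD
    have hDkeys : D.keys = ([(1, 0), (2, 50)] ++ (PySem.List.pyRange 3 c 1).map (fun n => ((n : Int), pvClosed n))).map Prod.fst := rfl
    have hndk : D.keys.Nodup := by rw [hDkeys]; exact hnd
    -- lookup of the previous level
    have hget : D.getD (c - 1) 0 = pvClosed (c - 1) := by
      apply PySem.Dict.getD_of_mem_items _ _ hndk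
      show (c - 1, pvClosed (c - 1)) ∈ ([(1, 0), (2, 50)] ++ _)
      rcases eq_or_lt_of_le (show (3 : Int) ≤ c by omega) with h3 | h3
      · have : c - 1 = 2 := by omega
        rw [this]
        have : pvClosed 2 = 50 := by decide
        rw [this]; simp
      · refine List.mem_append_right _ ?_
        refine List.mem_map.mpr ⟨c - 1, ?_, rfl⟩
        rw [PySem.List.mem_pyRange_one]; omega
    -- the new key is fresh
    have hcont : D.contains c = false := by
      rw [PySem.Dict.contains_eq_decide_mem_keys, decide_eq_false_iff_not, hDkeys]
      have hr : (([(1, 0), (2, 50)] ++ (PySem.List.pyRange 3 c 1).map (fun n => ((n : Int), pvClosed n))).map Prod.fst)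
          = [1, 2] ++ PySem.List.pyRange 3 c 1 := by
        simp [Function.comp_def]
      rw [hr]
      intro hmem
      rcases List.mem_append.mp hmem with h | h
      · simp at h; omega
      · rw [PySem.List.mem_pyRange_one] at h; omega
    apply PySem.Dict.ext
    rw [PySem.Dict.items_insert_of_not_contains D _ hcont, hget, pvClosed_step]
    show D.items ++ [(c, pvClosed c)] = _
    simp [hD]

-- ===== VERDICT (by name: the statement is the Claim_ definition above) =====
theorem calculate_level_thresholds_spec : Claim_equal_calculate_level_thresholds := by
  intro m _
  show calculate_level_thresholds m = calculate_level_thresholds_alt m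
  unfold calculate_level_thresholds calculate_level_thresholds_alt
  by_cases h : 3 ≤ m + 1
  · obtain ⟨k, hk⟩ : ∃ k : Nat, m + 1 = 3 + (k : Int) := ⟨(m - 2).toNat, by omega⟩
    rw [hk]
    show (List.foldl (fun d level => d.insert level (d.getD (level - 1) 0 + 150 * (level - 2)))
        (PySem.Dict.mk [(1, 0), (2, 50)]) (PySem.List.pyRange 3 (3 + (k : Int)) 1)).items = _
    rw [pv_loop]
  · rw [PySem.List.pyRange_one_eq_nil (by omega)]
    simp
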